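-- pv_equiv track=rewrite | github.com/jrg-sln/academy | EDyA_I/theme_2/code/algoritmos/TrianguloPascal.py | trianguloPascal
-- ===== SOURCE A (Python) =====
-- def trianguloPascal(k):
--     n = 0
--     cont=0
--     while n<k:
--         lista = [[1],[1,1]]
--         for i in range(1,k):
--             linea = [1]
--             cont+=1
--             for j in range(0,len(lista[i])-1):
--                 linea.extend([lista[i][j] + lista[i][j+1] ])
--             linea +=[1]
--             lista.append(linea)
--
--         n += 1
--     return cont
-- ===== SOURCE B (Python) =====
-- def trianguloPascal(k):
--     # closed form: the outer while runs k times (k>=1), the inner for adds 1 per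
--     # each of the k-1 rows it builds, so cont = k*(k-1); 0 when the loop never runs.
--     return k * (k - 1) if k >= 1 else 0
-- ===== Notes on version B (the rewrite author's own statement) =====
-- stated objective: faster
-- what changed: B replaces the triple-nested Pascal-triangle construction (whose rows are built and discarded) with the closed form k*(k-1) for k>=1 and 0 otherwise.
import Mathlib
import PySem

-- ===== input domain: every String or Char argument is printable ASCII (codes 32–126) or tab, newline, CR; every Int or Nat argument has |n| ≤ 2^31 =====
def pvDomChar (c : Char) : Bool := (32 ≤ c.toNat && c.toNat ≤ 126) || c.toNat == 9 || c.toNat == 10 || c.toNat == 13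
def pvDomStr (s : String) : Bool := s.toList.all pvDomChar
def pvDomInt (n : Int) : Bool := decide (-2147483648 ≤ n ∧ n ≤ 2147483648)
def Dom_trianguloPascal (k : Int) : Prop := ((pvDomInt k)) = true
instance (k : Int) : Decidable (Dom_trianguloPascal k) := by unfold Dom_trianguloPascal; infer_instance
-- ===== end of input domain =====

-- B replaces A's triple-nested Pascal-triangle construction by the closed form
-- k*(k-1) for k ≥ 1 and 0 otherwise (objective: faster, asymptotic).

-- ===== PORT A =====
-- body of 'for i in range(1, k)': reads lista[i] (always in range when reached,
-- so pyGetD with default [] is exact here), builds the next row, appends it, cont += 1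
def pvInnerStep (st : List (List Int) × Int) (i : Int) : List (List Int) × Int :=
  let row := PySem.List.pyGetD st.1 i []
  let linea : List Int := [1]
  let linea := (PySem.List.pyRange 0 ((row.length : Int) - 1) 1).foldl
      (fun acc j => acc ++ [PySem.List.pyGetD row j 0 + PySem.List.pyGetD row (j + 1) 0]) linea
  (st.1 ++ [linea ++ [1]], st.2 + 1)

-- 'while n < k' runs k.toNat times; each pass rebuilds lista from [[1],[1,1]]
def trianguloPascal (k : Int) : Int :=
  (List.range k.toNat).foldl
    (fun cont _ => ((PySem.List.pyRange 1 k 1).foldl pvInnerStep ([[1], [1, 1]], cont)).2) 0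

-- ===== PORT B =====
def trianguloPascal_alt (k : Int) : Int :=
  if 1 ≤ k then k * (k - 1) else 0

-- ===== PRECONDITION & SPEC =====
def Spec_trianguloPascal (k : Int) (out : Int) : Prop := out = trianguloPascal_alt k
instance (k : Int) (out : Int) : Decidable (Spec_trianguloPascal k out) := by unfold Spec_trianguloPascal; infer_instance

-- ===== CLAIM (what is proved, stated in full; the proofs are below) =====
def Claim_equal_trianguloPascal : Prop := ∀ (k : Int), Dom_trianguloPascal k → Spec_trianguloPascal k (trianguloPascal k)

-- ===== LEMMAS AND PROOFS =====

-- the cont component of the inner for-loop grows by exactly the number of iterations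
theorem pvInner_snd (l : List Int) : ∀ (lista : List (List Int)) (cont : Int),
    (l.foldl pvInnerStep (lista, cont)).2 = cont + l.length := by
  induction l with
  | nil => intro lista cont; simp
  | cons x xs ih =>
      intro lista cont
      simp only [List.foldl_cons, pvInnerStep, List.length_cons, ih]
      push_cast; ring

theorem pvOuter_const (c : Int) (m : Nat) : ∀ (s : Int),
    (List.range m).foldl (fun cont _ => cont + c) s = s + m * c := by
  induction m with
  | zero => intro s; simp
  | succ n ih =>
      intro s
      rw [List.range_succ, List.foldl_append]
      simp [ih]; ring

theorem trianguloPascal_closed (k : Int) :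
    trianguloPascal k = (k.toNat : Int) * (((k - 1).toNat : Int)) := by
  unfold trianguloPascal
  have hlen : ((PySem.List.pyRange 1 k 1).length : Int) = ((k - 1).toNat : Int) := by
    rw [PySem.List.length_pyRange_one]
  have hstep : (fun (cont : Int) (_ : Nat) =>
      ((PySem.List.pyRange 1 k 1).foldl pvInnerStep ([[1], [1, 1]], cont)).2)
      = fun cont _ => cont + ((k - 1).toNat : Int) := by
    funext cont _
    rw [pvInner_snd, hlen]
  rw [hstep, pvOuter_const]
  ring

-- ===== VERDICT (by name: the statement is the Claim_ definition above) =====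
theorem trianguloPascal_spec : Claim_equal_trianguloPascal := by
  intro k _
  unfold Spec_trianguloPascal trianguloPascal_alt
  rw [trianguloPascal_closed]
  by_cases h : 1 ≤ k
  · rw [if_pos h, Int.toNat_of_nonneg (by omega), Int.toNat_of_nonneg (by omega)]
  · rw [if_neg h]
    have : k.toNat = 0 := by omega
    simp [this]
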